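-- pv_equiv track=rewrite | github.com/PlayfulProcess/recursive.eco-schemas | scripts/build_zarathustra.py | assign_thematic_group
-- ===== SOURCE A (Python) =====
-- def assign_thematic_group(chapter_id, title, part):
--     """Assign chapters to thematic groups for L2 emergence."""
--     # Define thematic groups
--     themes = {
--         'self-overcoming': {
--             'ids': [
--                 'the-three-metamorphoses', 'self-surpassing', 'the-way-of-the-creating-one',
--                 'the-bestowing-virtue', 'the-convalescent', 'the-higher-man',
--                 'the-spirit-of-gravity', 'old-and-new-tables',
--             ],
--             'name': 'Self-Overcoming and Transformation',
--             'about': 'Nietzsche\'s central teaching: the human being as something to be surpassed. These speeches trace the arc from camel to lion to child — from bearing burdens to destroying old values to creating new ones.',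
--         },
--         'critique-of-society': {
--             'ids': [
--                 'the-new-idol', 'the-flies-in-the-market-place', 'the-tarantulas',
--                 'the-famous-wise-ones', 'scholars', 'the-land-of-culture',
--                 'the-rabble', 'the-apostates', 'the-preachers-of-death',
--                 'the-academic-chairs-of-virtue',
--             ],
--             'name': 'Critique of Society and Culture',
--             'about': 'Zarathustra\'s fierce critique of the state, the marketplace, scholars, and all forms of cultural mediocrity. The tarantulas of equality, the new idol of the state, and the flies of the marketplace represent everything that suppresses the creative individual.',
--         },
--         'eternal-recurrence': {
--             'ids': [
--                 'the-vision-and-the-enigma', 'the-convalescent', 'the-seven-seals',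
--                 'the-second-dance-song', 'the-drunken-song', 'before-sunrise',
--                 'the-stillest-hour', 'noon-tide',
--             ],
--             'name': 'Eternal Recurrence and Amor Fati',
--             'about': 'The most abysmal thought: that everything returns eternally. These speeches chart Zarathustra\'s confrontation with this idea — from the vision of the gateway to the midnight bell\'s twelve strokes to his final Yes-saying.',
--         },
--         'body-and-earth': {
--             'ids': [
--                 'the-despisers-of-the-body', 'backworldsmen', 'on-the-olive-mount',
--                 'joys-and-passions', 'chastity', 'child-and-marriage',
--                 'the-three-evil-things', 'immaculate-perception',
--             ],
--             'name': 'Body, Earth, and the Senses',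
--             'about': 'Against the despisers of the body and the "backworldsmen" who posit another world beyond this one. Zarathustra calls humanity back to the earth, to the body as "a great reason," to sensuality and passion as holy.',
--         },
--         'solitude-and-return': {
--             'ids': [
--                 'zarathustras-prologue', 'the-child-with-the-mirror', 'the-wanderer',
--                 'involuntary-bliss', 'the-return-home', 'the-great-longing',
--                 'the-honey-sacrifice', 'the-sign',
--             ],
--             'name': 'Solitude and Return',
--             'about': 'Zarathustra\'s recurring rhythm: descent from the mountain, teaching among humans, retreat back to solitude. Each cycle deepens his wisdom and transforms his message. The tension between the need for solitude and the overflowing need to give shapes the entire work.',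
--         },
--         'companions-and-encounters': {
--             'ids': [
--                 'the-tree-on-the-hill', 'the-friend', 'old-and-young-women',
--                 'the-bite-of-the-adder', 'the-pale-criminal', 'the-pitiful',
--                 'the-cry-of-distress', 'talk-with-the-kings', 'the-leech',
--                 'the-magician', 'the-ugliest-man', 'the-voluntary-beggar',
--                 'the-shadow', 'the-greeting',
--             ],
--             'name': 'Companions and Encounters',
--             'about': 'Zarathustra\'s meetings with various figures — the young man on the hill, the friend, the kings, the leech, the magician, the ugliest man. Each encounter tests and refines his teaching. In Part Four, these "higher men" gather in his cave for the final drama.',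
--         },
--         'will-to-power': {
--             'ids': [
--                 'war-and-warriors', 'the-thousand-and-one-goals', 'neighbour-love',
--                 'voluntary-death', 'the-virtuous', 'the-priests',
--                 'redemption', 'manly-prudence', 'the-bedwarfing-virtue',
--                 'on-passing-by',
--             ],
--             'name': 'Will, Power, and Values',
--             'about': 'The revaluation of all values. Zarathustra challenges conventional morality — neighbour-love, priestly virtue, pity — and calls for a new table of values rooted in life-affirmation, strength, and creative power.',
--         },
--         'art-and-song': {
--             'ids': [
--                 'reading-and-writing', 'the-night-song', 'the-dance-song',
--                 'the-grave-song', 'the-sublime-ones', 'poets',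
--                 'great-events', 'the-soothsayer', 'the-song-of-melancholy',
--                 'science', 'among-daughters-of-the-desert', 'the-awakening',
--                 'the-ass-festival', 'the-supper', 'out-of-service',
--             ],
--             'name': 'Art, Song, and Celebration',
--             'about': 'Zarathustra as poet, dancer, and singer. The night-song, dance-song, and grave-song are among the most lyrical passages in philosophy. Part Four culminates in festival, music, and the drunken song\'s midnight affirmation.',
--         },
--     }
--
--     for theme_key, theme_data in themes.items():
--         if chapter_id in theme_data['ids']:
--             return theme_key
--
--     return None
-- ===== SOURCE B (Python) =====
-- # Flat reverse index id -> theme key, written out once (the duplicate id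
-- # 'the-convalescent' is listed under its FIRST theme, matching A's first-match
-- # scan); each call is then a single dict lookup with .get.
-- _ID_TO_THEME = {
--     'the-three-metamorphoses': 'self-overcoming',
--     'self-surpassing': 'self-overcoming',
--     'the-way-of-the-creating-one': 'self-overcoming',
--     'the-bestowing-virtue': 'self-overcoming',
--     'the-convalescent': 'self-overcoming',
--     'the-higher-man': 'self-overcoming',
--     'the-spirit-of-gravity': 'self-overcoming',
--     'old-and-new-tables': 'self-overcoming',
--     'the-new-idol': 'critique-of-society',
--     'the-flies-in-the-market-place': 'critique-of-society',
--     'the-tarantulas': 'critique-of-society',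
--     'the-famous-wise-ones': 'critique-of-society',
--     'scholars': 'critique-of-society',
--     'the-land-of-culture': 'critique-of-society',
--     'the-rabble': 'critique-of-society',
--     'the-apostates': 'critique-of-society',
--     'the-preachers-of-death': 'critique-of-society',
--     'the-academic-chairs-of-virtue': 'critique-of-society',
--     'the-vision-and-the-enigma': 'eternal-recurrence',
--     'the-seven-seals': 'eternal-recurrence',
--     'the-second-dance-song': 'eternal-recurrence',
--     'the-drunken-song': 'eternal-recurrence',
--     'before-sunrise': 'eternal-recurrence',
--     'the-stillest-hour': 'eternal-recurrence',
--     'noon-tide': 'eternal-recurrence',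
--     'the-despisers-of-the-body': 'body-and-earth',
--     'backworldsmen': 'body-and-earth',
--     'on-the-olive-mount': 'body-and-earth',
--     'joys-and-passions': 'body-and-earth',
--     'chastity': 'body-and-earth',
--     'child-and-marriage': 'body-and-earth',
--     'the-three-evil-things': 'body-and-earth',
--     'immaculate-perception': 'body-and-earth',
--     'zarathustras-prologue': 'solitude-and-return',
--     'the-child-with-the-mirror': 'solitude-and-return',
--     'the-wanderer': 'solitude-and-return',
--     'involuntary-bliss': 'solitude-and-return',
--     'the-return-home': 'solitude-and-return',
--     'the-great-longing': 'solitude-and-return',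
--     'the-honey-sacrifice': 'solitude-and-return',
--     'the-sign': 'solitude-and-return',
--     'the-tree-on-the-hill': 'companions-and-encounters',
--     'the-friend': 'companions-and-encounters',
--     'old-and-young-women': 'companions-and-encounters',
--     'the-bite-of-the-adder': 'companions-and-encounters',
--     'the-pale-criminal': 'companions-and-encounters',
--     'the-pitiful': 'companions-and-encounters',
--     'the-cry-of-distress': 'companions-and-encounters',
--     'talk-with-the-kings': 'companions-and-encounters',
--     'the-leech': 'companions-and-encounters',
--     'the-magician': 'companions-and-encounters',
--     'the-ugliest-man': 'companions-and-encounters',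
--     'the-voluntary-beggar': 'companions-and-encounters',
--     'the-shadow': 'companions-and-encounters',
--     'the-greeting': 'companions-and-encounters',
--     'war-and-warriors': 'will-to-power',
--     'the-thousand-and-one-goals': 'will-to-power',
--     'neighbour-love': 'will-to-power',
--     'voluntary-death': 'will-to-power',
--     'the-virtuous': 'will-to-power',
--     'the-priests': 'will-to-power',
--     'redemption': 'will-to-power',
--     'manly-prudence': 'will-to-power',
--     'the-bedwarfing-virtue': 'will-to-power',
--     'on-passing-by': 'will-to-power',
--     'reading-and-writing': 'art-and-song',
--     'the-night-song': 'art-and-song',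
--     'the-dance-song': 'art-and-song',
--     'the-grave-song': 'art-and-song',
--     'the-sublime-ones': 'art-and-song',
--     'poets': 'art-and-song',
--     'great-events': 'art-and-song',
--     'the-soothsayer': 'art-and-song',
--     'the-song-of-melancholy': 'art-and-song',
--     'science': 'art-and-song',
--     'among-daughters-of-the-desert': 'art-and-song',
--     'the-awakening': 'art-and-song',
--     'the-ass-festival': 'art-and-song',
--     'the-supper': 'art-and-song',
--     'out-of-service': 'art-and-song',
-- }
--
--
-- def assign_thematic_group(chapter_id, title, part):
--     """Assign chapters to thematic groups for L2 emergence."""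
--     return _ID_TO_THEME.get(chapter_id)
-- ===== Notes on version B (the rewrite author's own statement) =====
-- stated objective: idiomatic
-- what changed: Replaces the per-call rebuild of the nested theme table and the per-theme membership scans with a flat precomputed reverse-index dict id->theme (the duplicate id 'the-convalescent' listed once, under its first theme), so the body is a single dict .get lookup.
import Mathlib
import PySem

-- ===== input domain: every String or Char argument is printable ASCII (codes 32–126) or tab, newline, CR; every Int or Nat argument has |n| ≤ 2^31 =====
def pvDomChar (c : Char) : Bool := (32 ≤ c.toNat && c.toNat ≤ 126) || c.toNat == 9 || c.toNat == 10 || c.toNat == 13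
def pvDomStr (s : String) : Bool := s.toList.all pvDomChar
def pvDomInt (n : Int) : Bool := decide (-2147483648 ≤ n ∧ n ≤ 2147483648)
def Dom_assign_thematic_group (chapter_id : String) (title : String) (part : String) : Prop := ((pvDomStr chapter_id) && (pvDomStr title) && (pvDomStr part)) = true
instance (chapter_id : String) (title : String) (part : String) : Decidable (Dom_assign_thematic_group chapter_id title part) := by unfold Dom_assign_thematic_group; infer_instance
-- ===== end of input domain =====

-- B replaces A's per-call scan of the nested theme table by a flat precomputed
-- reverse index id → theme-key (duplicate id listed under its first theme) and
-- a single association-list lookup (idiomatic; return-value equivalence only).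

-- ===== PORT A =====
-- A's theme table, in Python insertion order (key, ids); the unused
-- 'name'/'about' fields are never read by A and are omitted.
def pvThemes : List (String × List String) := [
  ("self-overcoming",
    ["the-three-metamorphoses", "self-surpassing", "the-way-of-the-creating-one",
     "the-bestowing-virtue", "the-convalescent", "the-higher-man",
     "the-spirit-of-gravity", "old-and-new-tables"]),
  ("critique-of-society",
    ["the-new-idol", "the-flies-in-the-market-place", "the-tarantulas",
     "the-famous-wise-ones", "scholars", "the-land-of-culture",
     "the-rabble", "the-apostates", "the-preachers-of-death",
     "the-academic-chairs-of-virtue"]),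
  ("eternal-recurrence",
    ["the-vision-and-the-enigma", "the-convalescent", "the-seven-seals",
     "the-second-dance-song", "the-drunken-song", "before-sunrise",
     "the-stillest-hour", "noon-tide"]),
  ("body-and-earth",
    ["the-despisers-of-the-body", "backworldsmen", "on-the-olive-mount",
     "joys-and-passions", "chastity", "child-and-marriage",
     "the-three-evil-things", "immaculate-perception"]),
  ("solitude-and-return",
    ["zarathustras-prologue", "the-child-with-the-mirror", "the-wanderer",
     "involuntary-bliss", "the-return-home", "the-great-longing",
     "the-honey-sacrifice", "the-sign"]),
  ("companions-and-encounters",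
    ["the-tree-on-the-hill", "the-friend", "old-and-young-women",
     "the-bite-of-the-adder", "the-pale-criminal", "the-pitiful",
     "the-cry-of-distress", "talk-with-the-kings", "the-leech",
     "the-magician", "the-ugliest-man", "the-voluntary-beggar",
     "the-shadow", "the-greeting"]),
  ("will-to-power",
    ["war-and-warriors", "the-thousand-and-one-goals", "neighbour-love",
     "voluntary-death", "the-virtuous", "the-priests",
     "redemption", "manly-prudence", "the-bedwarfing-virtue",
     "on-passing-by"]),
  ("art-and-song",
    ["reading-and-writing", "the-night-song", "the-dance-song",
     "the-grave-song", "the-sublime-ones", "poets",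
     "great-events", "the-soothsayer", "the-song-of-melancholy",
     "science", "among-daughters-of-the-desert", "the-awakening",
     "the-ass-festival", "the-supper", "out-of-service"])]

-- A's loop: for theme_key, theme_data in themes.items(): if chapter_id in theme_data['ids']: return theme_key
def pvScanA (themes : List (String × List String)) (chapter_id : String) : Option String :=
  match themes with
  | [] => none
  | (theme_key, ids) :: rest =>
      if ids.contains chapter_id then some theme_key else pvScanA rest chapter_id

def assign_thematic_group (chapter_id : String) (title : String) (part : String) : Option String :=
  pvScanA pvThemes chapter_id

-- ===== PORT B =====
-- B's flat dict literal _ID_TO_THEME (80 distinct ids, insertion order).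
def pvFlatIndex : List (String × String) := [
  ("the-three-metamorphoses", "self-overcoming"),
  ("self-surpassing", "self-overcoming"),
  ("the-way-of-the-creating-one", "self-overcoming"),
  ("the-bestowing-virtue", "self-overcoming"),
  ("the-convalescent", "self-overcoming"),
  ("the-higher-man", "self-overcoming"),
  ("the-spirit-of-gravity", "self-overcoming"),
  ("old-and-new-tables", "self-overcoming"),
  ("the-new-idol", "critique-of-society"),
  ("the-flies-in-the-market-place", "critique-of-society"),
  ("the-tarantulas", "critique-of-society"),
  ("the-famous-wise-ones", "critique-of-society"),
  ("scholars", "critique-of-society"),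
  ("the-land-of-culture", "critique-of-society"),
  ("the-rabble", "critique-of-society"),
  ("the-apostates", "critique-of-society"),
  ("the-preachers-of-death", "critique-of-society"),
  ("the-academic-chairs-of-virtue", "critique-of-society"),
  ("the-vision-and-the-enigma", "eternal-recurrence"),
  ("the-seven-seals", "eternal-recurrence"),
  ("the-second-dance-song", "eternal-recurrence"),
  ("the-drunken-song", "eternal-recurrence"),
  ("before-sunrise", "eternal-recurrence"),
  ("the-stillest-hour", "eternal-recurrence"),
  ("noon-tide", "eternal-recurrence"),
  ("the-despisers-of-the-body", "body-and-earth"),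
  ("backworldsmen", "body-and-earth"),
  ("on-the-olive-mount", "body-and-earth"),
  ("joys-and-passions", "body-and-earth"),
  ("chastity", "body-and-earth"),
  ("child-and-marriage", "body-and-earth"),
  ("the-three-evil-things", "body-and-earth"),
  ("immaculate-perception", "body-and-earth"),
  ("zarathustras-prologue", "solitude-and-return"),
  ("the-child-with-the-mirror", "solitude-and-return"),
  ("the-wanderer", "solitude-and-return"),
  ("involuntary-bliss", "solitude-and-return"),
  ("the-return-home", "solitude-and-return"),
  ("the-great-longing", "solitude-and-return"),
  ("the-honey-sacrifice", "solitude-and-return"),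
  ("the-sign", "solitude-and-return"),
  ("the-tree-on-the-hill", "companions-and-encounters"),
  ("the-friend", "companions-and-encounters"),
  ("old-and-young-women", "companions-and-encounters"),
  ("the-bite-of-the-adder", "companions-and-encounters"),
  ("the-pale-criminal", "companions-and-encounters"),
  ("the-pitiful", "companions-and-encounters"),
  ("the-cry-of-distress", "companions-and-encounters"),
  ("talk-with-the-kings", "companions-and-encounters"),
  ("the-leech", "companions-and-encounters"),
  ("the-magician", "companions-and-encounters"),
  ("the-ugliest-man", "companions-and-encounters"),
  ("the-voluntary-beggar", "companions-and-encounters"),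
  ("the-shadow", "companions-and-encounters"),
  ("the-greeting", "companions-and-encounters"),
  ("war-and-warriors", "will-to-power"),
  ("the-thousand-and-one-goals", "will-to-power"),
  ("neighbour-love", "will-to-power"),
  ("voluntary-death", "will-to-power"),
  ("the-virtuous", "will-to-power"),
  ("the-priests", "will-to-power"),
  ("redemption", "will-to-power"),
  ("manly-prudence", "will-to-power"),
  ("the-bedwarfing-virtue", "will-to-power"),
  ("on-passing-by", "will-to-power"),
  ("reading-and-writing", "art-and-song"),
  ("the-night-song", "art-and-song"),
  ("the-dance-song", "art-and-song"),
  ("the-grave-song", "art-and-song"),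
  ("the-sublime-ones", "art-and-song"),
  ("poets", "art-and-song"),
  ("great-events", "art-and-song"),
  ("the-soothsayer", "art-and-song"),
  ("the-song-of-melancholy", "art-and-song"),
  ("science", "art-and-song"),
  ("among-daughters-of-the-desert", "art-and-song"),
  ("the-awakening", "art-and-song"),
  ("the-ass-festival", "art-and-song"),
  ("the-supper", "art-and-song"),
  ("out-of-service", "art-and-song")]

-- _ID_TO_THEME.get(chapter_id): first matching entry, None if absent.
def pvDictGet (idx : List (String × String)) (chapter_id : String) : Option String :=
  (idx.find? (fun p => p.1 == chapter_id)).map (fun p => p.2)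

def assign_thematic_group_alt (chapter_id : String) (title : String) (part : String) : Option String :=
  pvDictGet pvFlatIndex chapter_id

-- ===== PRECONDITION & SPEC =====
def Spec_assign_thematic_group (chapter_id : String) (title : String) (part : String) (out : Option String) : Prop := out = assign_thematic_group_alt chapter_id title part
instance (chapter_id : String) (title : String) (part : String) (out : Option String) : Decidable (Spec_assign_thematic_group chapter_id title part out) := by unfold Spec_assign_thematic_group; infer_instance

-- ===== CLAIM (what is proved, stated in full; the proofs are below) =====
def Claim_equal_assign_thematic_group : Prop := ∀ (chapter_id : String) (title : String) (part : String), Dom_assign_thematic_group chapter_id title part → Spec_assign_thematic_group chapter_id title part (assign_thematic_group chapter_id title part)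

-- ===== LEMMAS AND PROOFS =====

-- the per-theme table flattened to (id, key) pairs in A's scan order
-- (here 'the-convalescent' occurs twice, at positions 4 and 19)
def pvFlatten (themes : List (String × List String)) : List (String × String) :=
  themes.flatMap (fun t => t.2.map (fun cid => (cid, t.1)))

-- A's scan equals first-match lookup in the flattened pair list.
theorem pvScanA_eq_flatten (x : String) :
    ∀ themes, pvScanA themes x = pvDictGet (pvFlatten themes) x := by
  intro themes
  induction themes with
  | nil => simp [pvScanA, pvFlatten, pvDictGet]
  | cons t rest ih =>
      obtain ⟨key, ids⟩ := t
      have hfind : ∀ ids' : List String,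
          (ids'.map (fun cid => (cid, key))).find? (fun p => p.1 == x) =
            if ids'.contains x then some (x, key) else none := by
        intro ids'
        induction ids' with
        | nil => simp
        | cons c cs ihc =>
            by_cases hc : c = x
            · subst hc; simp
            · have hb : (c == x) = false := by simp [hc]
              have hxc : ¬ x = c := fun h => hc h.symm
              simp [hb, ihc, hxc]
      have hflat : pvFlatten ((key, ids) :: rest) =
          ids.map (fun cid => (cid, key)) ++ pvFlatten rest := by
        simp [pvFlatten]
      rw [show pvScanA ((key, ids) :: rest) x =
            (if ids.contains x then some key else pvScanA rest x) from rfl,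
          hflat]
      unfold pvDictGet
      rw [List.find?_append, hfind]
      by_cases hm : x ∈ ids
      · simp [hm]
      · have hm' : ids.contains x = false := by simpa using hm
        simp [hm, hm', ih, pvDictGet]

-- Dropping a later duplicate entry never changes a first-match lookup.
theorem pvDictGet_skip_dup (x d k v : String) (P Q : List (String × String))
    (h : (d, v) ∈ P) :
    pvDictGet (P ++ (d, k) :: Q) x = pvDictGet (P ++ Q) x := by
  unfold pvDictGet
  rw [List.find?_append, List.find?_append]
  cases hP : P.find? (fun p => p.1 == x) with
  | some q => simp
  | none =>
      have hdx : (d == x) = false := by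
        have := List.find?_eq_none.1 hP (d, v) h
        simpa using this
      simp [List.find?, hdx]

-- ===== VERDICT (by name: the statement is the Claim_ definition above) =====
theorem assign_thematic_group_spec : Claim_equal_assign_thematic_group := by
  intro chapter_id title part _
  unfold Spec_assign_thematic_group assign_thematic_group assign_thematic_group_alt
  rw [pvScanA_eq_flatten]
  have hsplit : pvFlatten pvThemes =
      pvFlatIndex.take 19 ++ ("the-convalescent", "eternal-recurrence") :: pvFlatIndex.drop 19 := by
    decide
  have hB : pvFlatIndex = pvFlatIndex.take 19 ++ pvFlatIndex.drop 19 := by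
    simp
  have hmem : ("the-convalescent", "self-overcoming") ∈ pvFlatIndex.take 19 := by
    decide
  rw [hsplit, pvDictGet_skip_dup chapter_id _ _ _ _ _ hmem, ← hB]
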